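-- pv_equiv track=rewrite | github.com/StevenN2021/Bioinformatics-Algorithms | Chapter1/findclumps.py | freq_table
-- ===== SOURCE A (Python) =====
-- def freq_table(window: str, k: int) -> dict[str,int]:
--     res = {}
--     for i in range(len(window)-k+1):
--         pattern = window[i:i+k]
--         if pattern not in res:
--             res[pattern] = 1
--         else:
--             res[pattern] += 1
--     return res
-- ===== SOURCE B (Python) =====
-- def freq_table(window: str, k: int) -> dict[str, int]:
--     kmers = [window[i:i+k] for i in range(len(window)-k+1)]
--     return {p: kmers.count(p) for p in dict.fromkeys(kmers)}
-- ===== Notes on version B (the rewrite author's own statement) =====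
-- stated objective: alternative
-- what changed: Replaces the incremental dict tally with two declarative passes: materialise the list of all k-mers, then map each first-occurrence key (dict.fromkeys) to its total list.count.
import Mathlib
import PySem

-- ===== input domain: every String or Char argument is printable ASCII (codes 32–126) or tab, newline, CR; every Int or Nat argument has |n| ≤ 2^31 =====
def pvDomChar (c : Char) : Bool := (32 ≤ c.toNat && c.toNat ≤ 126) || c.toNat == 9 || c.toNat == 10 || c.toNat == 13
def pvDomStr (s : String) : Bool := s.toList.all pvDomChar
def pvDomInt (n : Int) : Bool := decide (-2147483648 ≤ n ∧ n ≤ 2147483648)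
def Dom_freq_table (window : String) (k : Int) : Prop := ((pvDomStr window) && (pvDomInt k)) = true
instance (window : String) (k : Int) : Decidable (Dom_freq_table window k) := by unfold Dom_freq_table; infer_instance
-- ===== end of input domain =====

-- B replaces A's incremental dict tally by two declarative passes (materialise the k-mer list,
-- then map each first-occurrence key to its total count); alternative decomposition, not faster.


-- ===== PORT A =====
-- for i in range(len(window)-k+1): pattern = window[i:i+k]; if pattern not in res: res[pattern]=1 else res[pattern]+=1
def freq_table (window : String) (k : Int) : List (String × Int) :=
  ((PySem.List.pyRange 0 (PySem.Str.len window - k + 1) 1).foldl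
    (fun res i =>
      let pattern := PySem.Str.slice window (some i) (some (i + k))
      if res.contains pattern = false then res.insert pattern 1
      else res.insert pattern (res.getD pattern 0 + 1))
    (PySem.Dict.empty : PySem.Dict String Int)).items

-- ===== PORT B =====
-- kmers = [window[i:i+k] for i in range(len(window)-k+1)]; {p: kmers.count(p) for p in dict.fromkeys(kmers)}
def freq_table_alt (window : String) (k : Int) : List (String × Int) :=
  let kmers := (PySem.List.pyRange 0 (PySem.Str.len window - k + 1) 1).map
    (fun i => PySem.Str.slice window (some i) (some (i + k)))
  (PySem.List.dedup kmers).map (fun p => (p, (PySem.List.count kmers p : Int)))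

-- ===== PRECONDITION & SPEC =====
def Spec_freq_table (window : String) (k : Int) (out : List (String × Int)) : Prop := out = freq_table_alt window k
instance (window : String) (k : Int) (out : List (String × Int)) : Decidable (Spec_freq_table window k out) := by unfold Spec_freq_table; infer_instance

-- ===== CLAIM (what is proved, stated in full; the proofs are below) =====
def Claim_equal_freq_table : Prop := ∀ (window : String) (k : Int), Dom_freq_table window k → Spec_freq_table window k (freq_table window k)

-- ===== LEMMAS AND PROOFS =====

-- ===== VERDICT (by name: the statement is the Claim_ definition above) =====
theorem freq_table_spec : Claim_equal_freq_table := by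
  intro window k _
  show freq_table window k = freq_table_alt window k
  simp only [freq_table, freq_table_alt]
  have h1 :
      (PySem.List.pyRange 0 (PySem.Str.len window - k + 1) 1).foldl
        (fun (res : PySem.Dict String Int) (i : Int) =>
          let pattern := PySem.Str.slice window (some i) (some (i + k))
          if res.contains pattern = false then res.insert pattern 1
          else res.insert pattern (res.getD pattern 0 + 1))
        PySem.Dict.empty =
      (PySem.List.pyRange 0 (PySem.Str.len window - k + 1) 1).foldl
        (fun (res : PySem.Dict String Int) (i : Int) =>
          res.insert (PySem.Str.slice window (some i) (some (i + k)))
            (res.getD (PySem.Str.slice window (some i) (some (i + k))) 0 + 1))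
        PySem.Dict.empty := by
    congr 1
    funext res i
    by_cases h : res.contains (PySem.Str.slice window (some i) (some (i + k))) = false
    · rw [if_pos h, PySem.Dict.getD_of_not_contains res 0 h, zero_add]
    · rw [if_neg h]
  rw [h1]
  have h2 :
      (PySem.List.pyRange 0 (PySem.Str.len window - k + 1) 1).foldl
        (fun (res : PySem.Dict String Int) (i : Int) =>
          res.insert (PySem.Str.slice window (some i) (some (i + k)))
            (res.getD (PySem.Str.slice window (some i) (some (i + k))) 0 + 1))
        PySem.Dict.empty =
      PySem.Dict.counter
        ((PySem.List.pyRange 0 (PySem.Str.len window - k + 1) 1).map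
          (fun i => PySem.Str.slice window (some i) (some (i + k)))) := by
    rw [← PySem.Dict.foldl_insert_getD_add_one_eq_counter, List.foldl_map]
  rw [h2, PySem.Dict.items_counter]
  simp [PySem.List.count_eq]
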